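-- pv_equiv track=rewrite | github.com/CVrKaushikNarayanan/python | AmazonML_FlightSum.py | mini
-- ===== SOURCE A (Python) =====
-- def mini(i,n):
--     if(i+3<len(n)):
--         a=abs(abs(n[i])-abs(n[i+1]))
--         b=abs(abs(n[i])-abs(n[i+3]))
--         if(a<b):
--             return i+1,a
--         elif(b<a):
--             return i+3,b
--         else:
--             i1,c1 = mini(i+1,n)
--             i2,c2 = mini(i+3,n)
--             if c1<c2:
--                 return i1,c1+a
--             else:
--                 return i2,c2+b
--     else:
--         return i+1,abs(abs(n[i])-abs(n[i+1]))
-- ===== SOURCE B (Python) =====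
-- def mini(i, n):
--     # Top-down with a memo table: each index is solved at most once, so the
--     # tie case reuses cached results instead of re-expanding both branches.
--     memo = {}
--
--     def go(j):
--         if j in memo:
--             return memo[j]
--         if j + 3 < len(n):
--             a = abs(abs(n[j]) - abs(n[j + 1]))
--             b = abs(abs(n[j]) - abs(n[j + 3]))
--             if a < b:
--                 res = (j + 1, a)
--             elif b < a:
--                 res = (j + 3, b)
--             else:
--                 i1, c1 = go(j + 1)
--                 i2, c2 = go(j + 3)
--                 res = (i1, c1 + a) if c1 < c2 else (i2, c2 + b)
--         else:
--             res = (j + 1, abs(abs(n[j]) - abs(n[j + 1])))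
--         memo[j] = res
--         return res
--
--     return go(i)
-- ===== Notes on version B (the rewrite author's own statement) =====
-- stated objective: alternative
-- what changed: Replaces A's plain tie-branching recursion (exponential on tie chains, since each tie re-expands two full subproblems) with a memo table threaded through the recursion, so every index is solved at most once; B raises exactly where A raises and matches A everywhere A returns.
import Mathlib
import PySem

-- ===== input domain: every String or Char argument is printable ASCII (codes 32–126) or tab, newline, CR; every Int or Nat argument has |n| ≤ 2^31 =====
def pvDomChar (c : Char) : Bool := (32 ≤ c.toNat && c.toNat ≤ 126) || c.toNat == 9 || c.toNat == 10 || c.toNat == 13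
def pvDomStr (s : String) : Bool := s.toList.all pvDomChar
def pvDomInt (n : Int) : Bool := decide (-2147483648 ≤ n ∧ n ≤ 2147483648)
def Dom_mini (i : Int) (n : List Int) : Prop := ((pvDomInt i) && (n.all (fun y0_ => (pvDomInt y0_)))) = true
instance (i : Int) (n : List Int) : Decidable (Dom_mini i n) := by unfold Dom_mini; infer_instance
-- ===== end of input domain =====

-- B memoizes A's tie-branching recursion with a table, so each index is solved once (worst case drops from exponential to linear).

-- ===== PORT A =====
-- shared helpers: both Pythons compute abs(abs(n[j])-abs(n[j+1])) and abs(abs(n[j])-abs(n[j+3]))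
def pvG (n : List Int) (j : Int) : Int := PySem.List.pyGetD n j 0
def pvA (n : List Int) (j : Int) : Int := |(|pvG n j| - |pvG n (j + 1)|)|
def pvB (n : List Int) (j : Int) : Int := |(|pvG n j| - |pvG n (j + 3)|)|

def mini (i : Int) (n : List Int) : Int × Int :=
  if i + 3 < (n.length : Int) then
    let a := pvA n i
    let b := pvB n i
    if a < b then (i + 1, a)
    else if b < a then (i + 3, b)
    else
      let p1 := mini (i + 1) n
      let p2 := mini (i + 3) n
      if p1.2 < p2.2 then (p1.1, p1.2 + a) else (p2.1, p2.2 + b)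
  else (i + 1, pvA n i)
termination_by ((n.length : Int) - i).toNat
decreasing_by all_goals omega

-- ===== PORT B =====
-- go(j) with the memo dict threaded through as state (returns value and updated memo)
def miniGo (n : List Int) (memo : PySem.Dict Int (Int × Int)) (j : Int) :
    (Int × Int) × PySem.Dict Int (Int × Int) :=
  match memo.get? j with
  | some v => (v, memo)
  | none =>
    if j + 3 < (n.length : Int) then
      let a := pvA n j
      let b := pvB n j
      if a < b then ((j + 1, a), memo.insert j (j + 1, a))
      else if b < a then ((j + 3, b), memo.insert j (j + 3, b))
      else
        let r1 := miniGo n memo (j + 1)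
        let r2 := miniGo n r1.2 (j + 3)
        let res := if r1.1.2 < r2.1.2 then (r1.1.1, r1.1.2 + a) else (r2.1.1, r2.1.2 + b)
        (res, r2.2.insert j res)
    else ((j + 1, pvA n j), memo.insert j (j + 1, pvA n j))
termination_by ((n.length : Int) - j).toNat
decreasing_by all_goals omega

def mini_alt (i : Int) (n : List Int) : Int × Int :=
  (miniGo n PySem.Dict.empty i).1

-- ===== PRECONDITION & SPEC =====
-- pvReach n j: a tie-chain (steps +1/+3, a = b at every node) from j down to index len(n)-4;
-- exactly then A's tie recursion reaches the call mini(len(n)-1, n), which reads n[len(n)].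
-- (structural recursion on the fuel ((len n) - j).toNat, which bounds the chain length,
-- so that Pre_mini is kernel-decidable; the fuel never runs out before j+3 < len n fails)
def pvReachF (n : List Int) : Nat → Int → Bool
  | 0, _ => false
  | f + 1, j =>
    if j + 3 < (n.length : Int) then
      pvA n j == pvB n j &&
        (j + 3 == (n.length : Int) - 1 || pvReachF n f (j + 1) || pvReachF n f (j + 3))
    else false

def pvReach (n : List Int) (j : Int) : Bool := pvReachF n (((n.length : Int) - j).toNat) j

-- Pre_ excludes exactly the inputs where the Python A raises IndexError: a start index that is
-- not Python-valid for n[i]/n[i+1] (i < -len(n) or i+1 >= len(n)), or a value tie-chain from i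
-- to len(n)-4 (pvReach), on which A's recursion reads n[len(n)]. B returns wherever A returns.
def Pre_mini (i : Int) (n : List Int) : Prop :=
  -(n.length : Int) ≤ i ∧ i + 1 < (n.length : Int) ∧ pvReach n i = false
instance (i : Int) (n : List Int) : Decidable (Pre_mini i n) := by unfold Pre_mini; infer_instance
def pvWitness_mini : Int × List Int := (0, [1, 2, 3, 4, 5])
def Spec_mini (i : Int) (n : List Int) (out : Int × Int) : Prop := out = mini_alt i n
instance (i : Int) (n : List Int) (out : Int × Int) : Decidable (Spec_mini i n out) := by unfold Spec_mini; infer_instance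

-- ===== CLAIM (what is proved, stated in full; the proofs are below) =====
def Claim_equal_mini : Prop := ∀ (i : Int) (n : List Int), Dom_mini i n → Pre_mini i n → Spec_mini i n (mini i n)

-- ===== LEMMAS AND PROOFS =====
-- invariant: every cached entry is the value of A's recursion at its index
def pvInv (n : List Int) (m : PySem.Dict Int (Int × Int)) : Prop :=
  ∀ j v, m.get? j = some v → v = mini j n

theorem pvGo_correct (n : List Int) (m : PySem.Dict Int (Int × Int)) (j : Int)
    (hm : pvInv n m) :
    (miniGo n m j).1 = mini j n ∧ pvInv n (miniGo n m j).2 := by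
  rw [miniGo]
  cases hget : m.get? j with
  | some v => exact ⟨hm j v hget, by simpa [hget] using hm⟩
  | none =>
    by_cases hrec : j + 3 < (n.length : Int)
    · simp only [if_pos hrec]
      by_cases hab : pvA n j < pvB n j
      · rw [if_pos hab]
        refine ⟨by rw [mini]; simp [hrec, hab], ?_⟩
        intro j' v' hv'
        rw [PySem.Dict.get?_insert] at hv'
        by_cases hj' : j' = j
        · rw [if_pos hj'] at hv'
          cases hv'; subst hj'; rw [mini]; simp [hrec, hab]
        · exact hm j' v' (by rwa [if_neg hj'] at hv')
      · by_cases hba : pvB n j < pvA n j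
        · rw [if_neg hab, if_pos hba]
          refine ⟨by rw [mini]; simp [hrec, hab, hba], ?_⟩
          intro j' v' hv'
          rw [PySem.Dict.get?_insert] at hv'
          by_cases hj' : j' = j
          · rw [if_pos hj'] at hv'
            cases hv'; subst hj'; rw [mini]; simp [hrec, hab, hba]
          · exact hm j' v' (by rwa [if_neg hj'] at hv')
        · rw [if_neg hab, if_neg hba]
          obtain ⟨e1, h1⟩ := pvGo_correct n m (j + 1) hm
          obtain ⟨e2, h2⟩ := pvGo_correct n (miniGo n m (j + 1)).2 (j + 3) h1
          have hres : (if (miniGo n m (j + 1)).1.2 < (miniGo n (miniGo n m (j + 1)).2 (j + 3)).1.2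
              then ((miniGo n m (j + 1)).1.1, (miniGo n m (j + 1)).1.2 + pvA n j)
              else ((miniGo n (miniGo n m (j + 1)).2 (j + 3)).1.1,
                    (miniGo n (miniGo n m (j + 1)).2 (j + 3)).1.2 + pvB n j)) = mini j n := by
            rw [e1, e2]
            conv_rhs => rw [mini]
            simp [hrec, hab, hba]
          refine ⟨hres, ?_⟩
          intro j' v' hv'
          rw [PySem.Dict.get?_insert] at hv'
          by_cases hj' : j' = j
          · rw [if_pos hj'] at hv'
            cases hv'; subst hj'; exact hres
          · exact h2 j' v' (by rwa [if_neg hj'] at hv')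
    · simp only [if_neg hrec]
      refine ⟨by rw [mini]; simp [hrec], ?_⟩
      intro j' v' hv'
      rw [PySem.Dict.get?_insert] at hv'
      by_cases hj' : j' = j
      · rw [if_pos hj'] at hv'
        cases hv'; subst hj'; rw [mini]; simp [hrec]
      · exact hm j' v' (by rwa [if_neg hj'] at hv')
termination_by ((n.length : Int) - j).toNat
decreasing_by all_goals omega

-- ===== VERDICT (by name: the statement is the Claim_ definition above) =====
theorem mini_spec : Claim_equal_mini := by
  intro i n _ _
  show mini i n = mini_alt i n
  have hempty : pvInv n PySem.Dict.empty := by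
    intro j v hv
    simp [PySem.Dict.get?_empty] at hv
  exact ((pvGo_correct n PySem.Dict.empty i hempty).1).symm
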